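-- pv_equiv track=rewrite | github.com/datacoolie/datacoolie | tests/unit/sources/test_api_reader_advanced.py | get_count_and_max_values
-- ===== SOURCE A (Python) =====
-- def get_count_and_max_values(df, columns):
--     count = len(df)
--     maxes = {}
--     for col in columns:
--         vals = [r.get(col) for r in df if r.get(col) is not None]
--         if vals:
--             maxes[col] = max(vals)
--     return count, maxes
-- ===== SOURCE B (Python) =====
-- def get_count_and_max_values(df, columns):
--     maxes = {}
--     for r in df:
--         for col in columns:
--             v = r.get(col)
--             if v is not None:
--                 maxes[col] = v if col not in maxes else max(maxes[col], v)
--     return len(df), {c: maxes[c] for c in columns if c in maxes}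
-- ===== Notes on version B (the rewrite author's own statement) =====
-- stated objective: alternative
-- what changed: Row-major single sweep with incremental running maxima (then emitted in column order) instead of A's column-major per-column list build and max reduction.
import Mathlib
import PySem

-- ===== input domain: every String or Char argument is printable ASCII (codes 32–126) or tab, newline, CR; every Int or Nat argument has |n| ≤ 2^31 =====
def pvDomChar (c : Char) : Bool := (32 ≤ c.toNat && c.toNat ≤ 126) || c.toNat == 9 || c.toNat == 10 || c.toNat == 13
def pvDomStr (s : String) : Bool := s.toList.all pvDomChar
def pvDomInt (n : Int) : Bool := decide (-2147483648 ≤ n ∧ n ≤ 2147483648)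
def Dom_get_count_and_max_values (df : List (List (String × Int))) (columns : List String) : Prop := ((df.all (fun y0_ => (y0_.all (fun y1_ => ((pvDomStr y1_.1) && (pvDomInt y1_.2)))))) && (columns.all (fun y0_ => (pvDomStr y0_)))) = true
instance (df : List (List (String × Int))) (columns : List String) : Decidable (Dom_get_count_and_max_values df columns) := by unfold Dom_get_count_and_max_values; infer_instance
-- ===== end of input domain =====

-- B replaces A's column-major per-column list build + max reduction by one row-major sweep
-- with incremental running maxima, emitted in column order (objective: alternative).


-- shared: Python r.get(col) on a row given as an association list (first match, exact)
def rowGet (r : List (String × Int)) (k : String) : Option Int :=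
  (PySem.Dict.mk r).get? k

-- ===== PORT A =====
def get_count_and_max_values (df : List (List (String × Int))) (columns : List String) : Int × (List (String × Int)) :=
  let count : Int := (df.length : Int)
  let maxes : PySem.Dict String Int :=
    columns.foldl (fun maxes col =>
      let vals : List Int := df.filterMap (fun r => rowGet r col)
      match PySem.List.max? vals (fun v => v) with   -- `if vals: maxes[col] = max(vals)`
      | some m => maxes.insert col m
      | none => maxes) PySem.Dict.empty
  (count, maxes.items)

-- ===== PORT B =====
-- one row of B's sweep: for col in columns, fold v into the running maxima
def bRow (columns : List String) (m : PySem.Dict String Int) (r : List (String × Int)) : PySem.Dict String Int :=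
  columns.foldl (fun m col =>
    match rowGet r col with
    | none => m
    | some v =>
      match m.get? col with
      | none => m.insert col v
      | some cur => m.insert col (max cur v)) m

def get_count_and_max_values_alt (df : List (List (String × Int))) (columns : List String) : Int × (List (String × Int)) :=
  let maxes : PySem.Dict String Int := df.foldl (bRow columns) PySem.Dict.empty
  let res : PySem.Dict String Int :=
    columns.foldl (fun res col =>
      match maxes.get? col with   -- `{c: maxes[c] for c in columns if c in maxes}`
      | some v => res.insert col v
      | none => res) PySem.Dict.empty
  ((df.length : Int), res.items)

-- ===== PRECONDITION & SPEC =====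
def Spec_get_count_and_max_values (df : List (List (String × Int))) (columns : List String) (out : Int × (List (String × Int))) : Prop := out = get_count_and_max_values_alt df columns
instance (df : List (List (String × Int))) (columns : List String) (out : Int × (List (String × Int))) : Decidable (Spec_get_count_and_max_values df columns out) := by unfold Spec_get_count_and_max_values; infer_instance

-- ===== CLAIM (what is proved, stated in full; the proofs are below) =====
def Claim_equal_get_count_and_max_values : Prop := ∀ (df : List (List (String × Int))) (columns : List String), Dom_get_count_and_max_values df columns → Spec_get_count_and_max_values df columns (get_count_and_max_values df columns)

-- ===== LEMMAS AND PROOFS =====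

-- option-level "fold one more value into the running max"
def combOpt (o w : Option Int) : Option Int :=
  match w with
  | none => o
  | some v => some (match o with | none => v | some c => max c v)

-- the value of the inner (per-row) fold at a key
lemma bRow_get? (r : List (String × Int)) (cs : List String) (m : PySem.Dict String Int) (c : String) :
    (cs.foldl (fun m col =>
      match rowGet r col with
      | none => m
      | some v =>
        match m.get? col with
        | none => m.insert col v
        | some cur => m.insert col (max cur v)) m).get? c
    = if c ∈ cs then combOpt (m.get? c) (rowGet r c) else m.get? c := by
  induction cs generalizing m with
  | nil => simp
  | cons col rest ih =>
    simp only [List.foldl_cons, ih, List.mem_cons]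
    by_cases hc : c = col
    · subst hc
      cases hr : rowGet r c with
      | none => simp [combOpt]
      | some v =>
        cases hm : m.get? c with
        | none => simp [PySem.Dict.get?_insert_self, combOpt]
        | some cur => simp [PySem.Dict.get?_insert_self, combOpt]
    · have hne : ¬ (c = col ∨ c ∈ rest) ↔ ¬ c ∈ rest := by tauto
      have hget : (match rowGet r col with
        | none => m
        | some v =>
          match m.get? col with
          | none => m.insert col v
          | some cur => m.insert col (max cur v)).get? c = m.get? c := by
        cases rowGet r col with
        | none => rfl
        | some v =>
          cases m.get? col <;> simp [PySem.Dict.get?_insert_of_ne _ _ hc]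
      rw [hget]
      by_cases hrest : c ∈ rest <;> simp [hrest, hc]

-- the value of the whole sweep at a key that is one of the columns
lemma sweep_get? (columns : List String) (c : String) (hc : c ∈ columns) :
    ∀ (df : List (List (String × Int))) (m : PySem.Dict String Int),
    (df.foldl (bRow columns) m).get? c = df.foldl (fun o r => combOpt o (rowGet r c)) (m.get? c) := by
  intro df
  induction df with
  | nil => intro m; rfl
  | cons r t ih =>
    intro m
    simp only [List.foldl_cons, ih]
    have : (bRow columns m r).get? c = combOpt (m.get? c) (rowGet r c) := by
      simpa [bRow, hc] using bRow_get? r columns m c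
    rw [this]

-- the option fold over the rows is Python's max of the non-None values
lemma foldl_combOpt_some (c : String) (df : List (List (String × Int))) (a : Int) :
    df.foldl (fun o r => combOpt o (rowGet r c)) (some a)
      = some ((df.filterMap (fun r => rowGet r c)).foldl max a) := by
  induction df generalizing a with
  | nil => rfl
  | cons r t ih =>
    cases hr : rowGet r c with
    | none =>
      simp only [List.foldl_cons, List.filterMap_cons, hr]
      exact ih a
    | some v =>
      simp only [List.foldl_cons, List.filterMap_cons, hr]
      exact ih (max a v)

lemma foldl_combOpt_none (c : String) (df : List (List (String × Int))) :
    df.foldl (fun o r => combOpt o (rowGet r c)) none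
      = PySem.List.max? (df.filterMap (fun r => rowGet r c)) (fun v => v) := by
  induction df with
  | nil => rfl
  | cons r t ih =>
    cases hr : rowGet r c with
    | none =>
      simp only [List.foldl_cons, List.filterMap_cons, hr]
      exact ih
    | some v =>
      simp only [List.foldl_cons, List.filterMap_cons, hr]
      rw [PySem.List.max?_id_cons]
      exact foldl_combOpt_some c t v

-- ===== VERDICT (by name: the statement is the Claim_ definition above) =====
theorem get_count_and_max_values_spec : Claim_equal_get_count_and_max_values := by
  intro df columns _
  unfold Spec_get_count_and_max_values get_count_and_max_values get_count_and_max_values_alt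
  have key : ∀ c ∈ columns,
      ((df.foldl (bRow columns) PySem.Dict.empty).get? c)
        = PySem.List.max? (df.filterMap (fun r => rowGet r c)) (fun v => v) := by
    intro c hc
    rw [sweep_get? columns c hc df PySem.Dict.empty]
    simpa using foldl_combOpt_none c df
  have : (columns.foldl (fun maxes col =>
      match PySem.List.max? (df.filterMap (fun r => rowGet r col)) (fun v => v) with
      | some m => maxes.insert col m
      | none => maxes) (PySem.Dict.empty : PySem.Dict String Int))
      = columns.foldl (fun res col =>
      match (df.foldl (bRow columns) PySem.Dict.empty).get? col with
      | some v => res.insert col v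
      | none => res) PySem.Dict.empty := by
    apply PySem.List.foldl_congr_mem
    intro acc x hx
    rw [key x hx]
  exact congrArg (fun d => ((df.length : Int), PySem.Dict.items d)) this
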